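-- pv_equiv track=rewrite | github.com/manched/BlackJackAI | old_main.py | higherCards
-- ===== SOURCE A (Python) =====
-- AllCards = {'A':4, '2':4, '3':4, '4':4, '5':4, '6':4, '7':4, '8':4, '9':4, '10':4, 'J':4, 'Q':4, 'K':4}
--
-- def higherCards(inputnum):
--     greaterCards = 0
--     lowerCards = 0
--
--     for i in range(1, 11):
--         if(i>inputnum):
--             greaterCards += AllCards[numToChar(i)]
--         else:
--             lowerCards += AllCards[numToChar(i)]
--
--     if(10>inputnum):
--         greaterCards += AllCards[numToChar(11)]
--         greaterCards += AllCards[numToChar(12)]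
--         greaterCards += AllCards[numToChar(13)]
--     else:
--         lowerCards += AllCards[numToChar(11)]
--         lowerCards += AllCards[numToChar(12)]
--         lowerCards += AllCards[numToChar(13)]
--
--     return greaterCards, lowerCards
--
-- def numToChar(inputnum):
--     if(inputnum==1):
--         return 'A'
--     elif(inputnum==2):
--         return '2'
--     elif(inputnum==3):
--         return '3'
--     elif(inputnum==4):
--         return '4'
--     elif(inputnum==5):
--         return '5'
--     elif(inputnum==6):
--         return '6'
--     elif(inputnum==7):
--         return '7'
--     elif(inputnum==8):
--         return '8'
--     elif(inputnum==9):
--         return '9'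
--     elif(inputnum==10):
--         return '10'
--     elif(inputnum==11):
--         return 'J'
--     elif(inputnum==12):
--         return 'Q'
--     elif(inputnum==13):
--         return 'K'
--     return inputnum
-- ===== SOURCE B (Python) =====
-- def higherCards(inputnum):
--     g = 4 * (10 - max(0, min(10, inputnum))) + (12 if inputnum < 10 else 0)
--     return g, 52 - g
-- ===== Notes on version B (the rewrite author's own statement) =====
-- stated objective: simpler
-- what changed: Replaces the rank-by-rank loop plus the face-card block (with dict lookups through numToChar) by a closed-form clamp formula: four cards per rank strictly above the clamped input, twelve more for the face cards when the input is below ten, and the lower count as the remainder of the full deck.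
import Mathlib
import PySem

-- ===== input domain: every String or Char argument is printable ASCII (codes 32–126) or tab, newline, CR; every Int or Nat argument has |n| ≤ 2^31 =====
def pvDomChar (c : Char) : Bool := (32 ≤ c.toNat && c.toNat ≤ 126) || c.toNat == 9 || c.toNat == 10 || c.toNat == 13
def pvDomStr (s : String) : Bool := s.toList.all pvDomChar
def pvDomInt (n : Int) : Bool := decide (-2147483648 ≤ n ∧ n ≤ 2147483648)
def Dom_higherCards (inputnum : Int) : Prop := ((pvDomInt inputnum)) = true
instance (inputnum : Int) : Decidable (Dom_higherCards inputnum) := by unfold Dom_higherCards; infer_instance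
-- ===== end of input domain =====

-- B replaces A's rank-by-rank loop and dict lookups with a closed-form clamp formula; objective: simpler.

-- ===== PORT A =====
def AllCards : PySem.Dict String Int :=
  PySem.Dict.ofList [("A",4), ("2",4), ("3",4), ("4",4), ("5",4), ("6",4),
                     ("7",4), ("8",4), ("9",4), ("10",4), ("J",4), ("Q",4), ("K",4)]

-- Python's fallthrough returns the int itself; unreachable for 1..13 (the only calls A makes),
-- represented here as its decimal string.
def numToChar (inputnum : Int) : String :=
  if inputnum == 1 then "A"
  else if inputnum == 2 then "2"
  else if inputnum == 3 then "3"
  else if inputnum == 4 then "4"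
  else if inputnum == 5 then "5"
  else if inputnum == 6 then "6"
  else if inputnum == 7 then "7"
  else if inputnum == 8 then "8"
  else if inputnum == 9 then "9"
  else if inputnum == 10 then "10"
  else if inputnum == 11 then "J"
  else if inputnum == 12 then "Q"
  else if inputnum == 13 then "K"
  else PySem.Int.toStr inputnum

-- AllCards[key]: the key is always present for the calls A makes, so getD's default is never used.
def higherCards (inputnum : Int) : Int × Int :=
  let gl : Int × Int :=
    (PySem.List.pyRange 1 11 1).foldl
      (fun (gl : Int × Int) i =>
        if i > inputnum then (gl.1 + AllCards.getD (numToChar i) 0, gl.2)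
        else (gl.1, gl.2 + AllCards.getD (numToChar i) 0))
      (0, 0)
  if 10 > inputnum then
    (gl.1 + AllCards.getD (numToChar 11) 0 + AllCards.getD (numToChar 12) 0
          + AllCards.getD (numToChar 13) 0, gl.2)
  else
    (gl.1, gl.2 + AllCards.getD (numToChar 11) 0 + AllCards.getD (numToChar 12) 0
               + AllCards.getD (numToChar 13) 0)

-- ===== PORT B =====
def higherCards_alt (inputnum : Int) : Int × Int :=
  let g : Int := 4 * (10 - max 0 (min 10 inputnum)) + (if inputnum < 10 then 12 else 0)
  (g, 52 - g)

-- ===== PRECONDITION & SPEC =====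
def Spec_higherCards (inputnum : Int) (out : Int × Int) : Prop := out = higherCards_alt inputnum
instance (inputnum : Int) (out : Int × Int) : Decidable (Spec_higherCards inputnum out) := by unfold Spec_higherCards; infer_instance

-- ===== CLAIM (what is proved, stated in full; the proofs are below) =====
def Claim_equal_higherCards : Prop := ∀ (inputnum : Int), Dom_higherCards inputnum → Spec_higherCards inputnum (higherCards inputnum)

-- ===== LEMMAS AND PROOFS =====
theorem pvRange_lit : PySem.List.pyRange 1 11 1 = [1,2,3,4,5,6,7,8,9,10] := by decide

theorem pvCard4 : ∀ j ∈ ([1,2,3,4,5,6,7,8,9,10,11,12,13] : List Int), AllCards.getD (numToChar j) 0 = 4 := by decide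

-- ===== VERDICT (by name: the statement is the Claim_ definition above) =====
theorem higherCards_spec : Claim_equal_higherCards := by
  intro n _
  show higherCards n = higherCards_alt n
  have h := pvCard4
  simp only [List.mem_cons, List.not_mem_nil, or_false, forall_eq_or_imp, forall_eq] at h
  obtain ⟨h1,h2,h3,h4,h5,h6,h7,h8,h9,h10,h11,h12,h13⟩ := h
  by_cases h0 : n < 1
  · simp only [higherCards, higherCards_alt]
    rw [PySem.List.foldl_congr_mem _ _ (fun (gl : Int × Int) _ => (gl.1 + 4, gl.2)) _
      (by intro acc x hx
          obtain ⟨hx1, hx2⟩ := PySem.List.mem_pyRange_one.mp hx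
          rw [if_pos (by omega : x > n)]
          interval_cases x <;> simp [h1,h2,h3,h4,h5,h6,h7,h8,h9,h10])]
    rw [pvRange_lit]
    simp only [List.foldl, h11, h12, h13]
    rw [if_pos (by omega : (10:Int) > n), if_pos (by omega : n < 10)]
    simp only [Prod.mk.injEq]
    constructor <;> omega
  · by_cases hT : 10 ≤ n
    · simp only [higherCards, higherCards_alt]
      rw [PySem.List.foldl_congr_mem _ _ (fun (gl : Int × Int) _ => (gl.1, gl.2 + 4)) _
        (by intro acc x hx
            obtain ⟨hx1, hx2⟩ := PySem.List.mem_pyRange_one.mp hx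
            rw [if_neg (by omega : ¬ x > n)]
            interval_cases x <;> simp [h1,h2,h3,h4,h5,h6,h7,h8,h9,h10])]
      rw [pvRange_lit]
      simp only [List.foldl, h11, h12, h13]
      rw [if_neg (by omega : ¬ (10:Int) > n), if_neg (by omega : ¬ n < 10)]
      simp only [Prod.mk.injEq]
      constructor <;> omega
    · interval_cases n <;> decide
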